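-- pv_equiv track=rewrite | github.com/pfarcasanu/leetcode | caesar_cipher.py | groupings
-- ===== SOURCE A (Python) =====
-- def normalize(s):
--   new_s = [''] * len(s)
--   upshift = (26 - ord(s[0]) + 97) % 26
--   for i, c in enumerate(s):
--     newc = (ord(c) - 97 + upshift) % 26
--     new_s[i] = chr(newc + 97)
--   return "".join(new_s)
--
-- def groupings(words):
--   out = {}
--   for word in words:
--     normword = normalize(word)
--     group = out.get(normword, [])
--     group.append(word)
--     out[normword] = group
--   return list(out.values())
-- ===== SOURCE B (Python) =====
-- def groupings(words):
--     keys = [tuple((ord(b) - ord(a)) % 26 for a, b in zip(w, w[1:])) for w in words]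
--     order = []
--     for k in keys:
--         if k not in order:
--             order.append(k)
--     return [[w for w, kk in zip(words, keys) if kk == k] for k in order]
-- ===== Notes on version B (the rewrite author's own statement) =====
-- stated objective: alternative
-- what changed: B replaces A's single dict-grouping loop over normalize()'d string keys by three staged passes: map each word to a Caesar-invariant tuple of consecutive character differences mod 26, dedup those keys in first-appearance order, then build each group by filtering the zipped (word,key) list.
import Mathlib
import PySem

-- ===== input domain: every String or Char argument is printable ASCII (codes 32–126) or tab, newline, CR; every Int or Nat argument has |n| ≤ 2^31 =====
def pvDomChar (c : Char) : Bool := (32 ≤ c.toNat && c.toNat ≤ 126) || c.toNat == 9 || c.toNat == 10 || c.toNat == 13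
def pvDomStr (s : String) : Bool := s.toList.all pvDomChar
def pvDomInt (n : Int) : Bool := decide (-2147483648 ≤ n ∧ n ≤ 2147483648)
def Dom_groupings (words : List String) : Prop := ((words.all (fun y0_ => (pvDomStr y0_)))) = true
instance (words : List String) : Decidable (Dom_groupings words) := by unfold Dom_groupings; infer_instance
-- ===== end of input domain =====

-- B replaces A's dict-grouping loop keyed by normalize() with three staged passes (map each word to its
-- consecutive-difference key mod 26, dedup keys in first-appearance order, filter per key); alternative, not faster.


-- ===== PORT A =====
-- normalize(s): IndexError on s = "" (reads s[0]) → Option; the enumerate-fill of new_s is the positional map.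
def pvNormalize (s : String) : Option String :=
  match PySem.Str.pyGet? s 0 with
  | none => none
  | some c0 =>
    some (String.ofList (s.toList.map (fun c =>
      Char.ofNat (PySem.Int.mod ((c.toNat : Int) - 97 + PySem.Int.mod (26 - (c0.toNat : Int) + 97) 26) 26 + 97).toNat)))

def groupings (words : List String) : List (List String) :=
  match words.foldl (fun (acc : Option (PySem.Dict String (List String))) word =>
      match acc with
      | none => none
      | some out =>
        match pvNormalize word with
        | none => none
        | some normword => some (out.insert normword (out.getD normword [] ++ [word])))
    (some PySem.Dict.empty) with
  | none => []          -- the Python raised (some word was empty); outside Pre_groupings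
  | some out => out.values

-- ===== PORT B =====
-- tuple((ord(b) - ord(a)) % 26 for a, b in zip(w, w[1:]))
def pvDiffKey (w : String) : List Int :=
  (w.toList.zip (w.toList.drop 1)).map (fun p => PySem.Int.mod ((p.2.toNat : Int) - (p.1.toNat : Int)) 26)

-- staged: keys = [diffkey(w) …]; order = first-appearance dedup of keys; one filtered group per key
def groupings_alt (words : List String) : List (List String) :=
  let keys := words.map pvDiffKey
  let order := keys.foldl (fun s k => if k ∈ s then s else s ++ [k]) ([] : List (List Int))
  order.map (fun k => ((words.zip keys).filter (fun p => p.2 == k)).map Prod.fst)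

-- ===== PRECONDITION & SPEC =====
-- Pre_ excludes inputs containing an empty word: there A raises IndexError (normalize reads s[0]), so A returns no value.
def Pre_groupings (words : List String) : Prop := ∀ w ∈ words, w ≠ ""
instance (words : List String) : Decidable (Pre_groupings words) := by unfold Pre_groupings; infer_instance
def pvWitness_groupings : List String := ["abc", "bcd", "xy", "a"]

def Spec_groupings (words : List String) (out : List (List String)) : Prop := out = groupings_alt words
instance (words : List String) (out : List (List String)) : Decidable (Spec_groupings words out) := by unfold Spec_groupings; infer_instance

-- ===== CLAIM (what is proved, stated in full; the proofs are below) =====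
def Claim_equal_groupings : Prop := ∀ (words : List String), Dom_groupings words → Pre_groupings words → Spec_groupings words (groupings words)

-- ===== LEMMAS AND PROOFS =====

-- proof-side helpers: normalized character value, encoded normalized key, prefix-sum reconstruction
def nval (c0 c : Char) : Int := ((c.toNat : Int) - (c0.toNat : Int)) % 26
def dval (a b : Char) : Int := ((b.toNat : Int) - (a.toNat : Int)) % 26
def enc (x : Int) : Char := Char.ofNat (x + 97).toNat
def nkey (w : String) : String :=
  match w.toList with
  | [] => ""
  | c0 :: cs => String.ofList (((c0 :: cs).map (nval c0)).map enc)
def recon (x : Int) : List Int → List Int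
  | [] => [x]
  | d :: ds => x :: recon ((x + d) % 26) ds
def dlist (l : List Char) : List Int := (l.zip l.tail).map (fun p => dval p.1 p.2)

lemma charval (c0 c : Char) :
    Char.ofNat (PySem.Int.mod ((c.toNat : Int) - 97 + PySem.Int.mod (26 - (c0.toNat : Int) + 97) 26) 26 + 97).toNat
      = enc (nval c0 c) := by
  unfold enc nval
  rw [PySem.Int.mod_eq_emod_of_pos (by norm_num : (0:Int) < 26),
      PySem.Int.mod_eq_emod_of_pos (by norm_num : (0:Int) < 26)]
  congr 2
  omega

lemma pvNormalize_eq_nkey (w : String) (h : w.toList ≠ []) : pvNormalize w = some (nkey w) := by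
  rcases hl : w.toList with _ | ⟨c0, cs⟩
  · exact absurd hl h
  · have hget : PySem.Str.pyGet? w 0 = some c0 := by
      simp [PySem.Str.pyGet?, hl, PySem.Chars.pyGet?]
    simp only [pvNormalize, nkey, hget, hl]
    congr 2
    rw [List.map_map]
    exact List.map_congr_left (fun c _ => charval c0 c)

-- B's per-word key is the consecutive-difference list
lemma pvDiffKey_eq_dlist (w : String) : pvDiffKey w = dlist w.toList := by
  unfold pvDiffKey dlist
  rw [List.drop_one]
  exact List.map_congr_left (fun p _ => by
    unfold dval
    rw [PySem.Int.mod_eq_emod_of_pos (by norm_num : (0:Int) < 26)])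

lemma enc_toNat (x : Int) (h0 : 0 ≤ x) (h1 : x < 26) : (((enc x).toNat : Int)) = x + 97 := by
  unfold enc
  have h : (Char.ofNat (x + 97).toNat).toNat = (x + 97).toNat := by
    rw [Char.toNat_ofNat, if_pos]
    constructor
    omega
  omega

lemma nval_nonneg (c0 c : Char) : 0 ≤ nval c0 c := Int.emod_nonneg _ (by norm_num)
lemma nval_lt (c0 c : Char) : nval c0 c < 26 := Int.emod_lt_of_pos _ (by norm_num)

-- the nval list is recoverable from its enc encoding
lemma map_dec_map_enc (m : List Int) (h0 : ∀ x ∈ m, 0 ≤ x ∧ x < 26) :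
    (m.map enc).map (fun ch => ((ch.toNat : Int) - 97)) = m := by
  rw [List.map_map]
  conv_rhs => rw [← List.map_id m]
  apply List.map_congr_left
  intro x hx
  have hb := h0 x hx
  simp only [Function.comp, id]
  have := enc_toNat x hb.1 hb.2
  omega

-- the diff list is a function of the nval list
lemma dlist_eq_of_map_nval (c0 : Char) (l : List Char) :
    dlist l = ((l.map (nval c0)).zip (l.map (nval c0)).tail).map (fun p => (p.2 - p.1) % 26) := by
  induction l with
  | nil => rfl
  | cons a t ih =>
    cases t with
    | nil => rfl
    | cons b t' =>
      simp only [dlist, List.map_cons, List.tail_cons, List.zip_cons_cons, List.map_cons,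
        List.cons.injEq] at ih ⊢
      refine ⟨by unfold dval nval; omega, ih⟩

-- the nval list is a function of the diff list
lemma map_nval_eq_recon (cs : List Char) : ∀ (c0 a : Char),
    (a :: cs).map (nval c0) = recon (nval c0 a) (dlist (a :: cs)) := by
  induction cs with
  | nil => intro c0 a; rfl
  | cons b t ih =>
    intro c0 a
    simp only [dlist, List.tail_cons, List.zip_cons_cons, List.map_cons, recon,
      List.cons.injEq] at ih ⊢
    refine ⟨by trivial, ?_⟩
    have hb : ((nval c0 a) + dval a b) % 26 = nval c0 b := by unfold nval dval; omega
    rw [hb]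
    exact ih c0 b

-- the central key equivalence on nonempty words
lemma nkey_iff_diff (s t : String) (hs : s.toList ≠ []) (ht : t.toList ≠ []) :
    nkey s = nkey t ↔ dlist s.toList = dlist t.toList := by
  rcases hls : s.toList with _ | ⟨c0, cs⟩; · exact absurd hls hs
  rcases hlt : t.toList with _ | ⟨d0, ds⟩; · exact absurd hlt ht
  have hnks : nkey s = String.ofList (((c0 :: cs).map (nval c0)).map enc) := by
    simp only [nkey, hls]
  have hnkt : nkey t = String.ofList (((d0 :: ds).map (nval d0)).map enc) := by
    simp only [nkey, hlt]
  rw [hnks, hnkt]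
  have hbound : ∀ (e0 : Char) (l : List Char), ∀ x ∈ l.map (nval e0), 0 ≤ x ∧ x < 26 := by
    intro e0 l x hx
    rcases List.mem_map.1 hx with ⟨c, _, rfl⟩
    exact ⟨nval_nonneg e0 c, nval_lt e0 c⟩
  constructor
  · intro h
    have h' : ((c0 :: cs).map (nval c0)) = ((d0 :: ds).map (nval d0)) := by
      have hmap := congrArg (fun z => z.toList.map (fun ch => ((ch.toNat : Int) - 97))) h
      simpa only [String.toList_ofList, map_dec_map_enc _ (hbound _ _),
        map_dec_map_enc _ (hbound _ _)] using hmap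
    rw [dlist_eq_of_map_nval c0 (c0 :: cs), dlist_eq_of_map_nval d0 (d0 :: ds), h']
  · intro h
    have h0 : nval c0 c0 = 0 := by unfold nval; omega
    have h0' : nval d0 d0 = 0 := by unfold nval; omega
    have h' : ((c0 :: cs).map (nval c0)) = ((d0 :: ds).map (nval d0)) := by
      rw [map_nval_eq_recon, map_nval_eq_recon, h0, h0', h]
    rw [h']

-- lookups in the two dicts are aligned whenever the key functions induce the same equalities
lemma get?_aligned {K1 K2 : Type} [BEq K1] [LawfulBEq K1] [BEq K2] [LawfulBEq K2]
    (f1 : String → K1) (f2 : String → K2) (S : List String)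
    (hiff : ∀ a ∈ S, ∀ b ∈ S, (f1 a = f1 b ↔ f2 a = f2 b))
    (w : String) (hw : w ∈ S) :
    ∀ (rv : List (String × List String)), (∀ p ∈ rv, p.1 ∈ S) →
      (PySem.Dict.mk (rv.map (fun p => (f1 p.1, p.2)))).get? (f1 w)
        = (PySem.Dict.mk (rv.map (fun p => (f2 p.1, p.2)))).get? (f2 w) := by
  intro rv
  induction rv with
  | nil => intro _; rfl
  | cons p t ih =>
    intro hrep
    simp only [List.map_cons, PySem.Dict.get?_mk_cons]
    have hiffp : (f1 p.1 = f1 w) ↔ (f2 p.1 = f2 w) := hiff p.1 (hrep p (by simp)) w hw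
    have hb1 : ((f1 p.1 == f1 w) = true) ↔ (f1 p.1 = f1 w) := beq_iff_eq
    have hb2 : ((f2 p.1 == f2 w) = true) ↔ (f2 p.1 = f2 w) := beq_iff_eq
    by_cases h : f1 p.1 = f1 w
    · rw [if_pos (hb1.mpr h), if_pos (hb2.mpr (hiffp.1 h))]
    · rw [if_neg (fun hc => h (hb1.mp hc)), if_neg (fun hc => h (hiffp.2 (hb2.mp hc)))]
      exact ih (fun q hq => hrep q (by simp [hq]))

-- the two grouping loops produce the same values list
lemma loop_values {K1 K2 : Type} [BEq K1] [LawfulBEq K1] [BEq K2] [LawfulBEq K2]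
    (f1 : String → K1) (f2 : String → K2) (S : List String)
    (hiff : ∀ a ∈ S, ∀ b ∈ S, (f1 a = f1 b ↔ f2 a = f2 b)) :
    ∀ (l : List String) (rv : List (String × List String)),
      (∀ w ∈ l, w ∈ S) → (∀ p ∈ rv, p.1 ∈ S) →
      (rv.map (fun p => f1 p.1)).Nodup →
      (l.foldl (fun d w => d.insert (f1 w) (d.getD (f1 w) [] ++ [w]))
          (PySem.Dict.mk (rv.map (fun p => (f1 p.1, p.2))))).values
        = (l.foldl (fun d w => d.insert (f2 w) (d.getD (f2 w) [] ++ [w]))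
          (PySem.Dict.mk (rv.map (fun p => (f2 p.1, p.2))))).values := by
  intro l
  induction l with
  | nil =>
    intro rv _ _ _
    simp [PySem.Dict.values, List.map_map, Function.comp]
  | cons w l ih =>
    intro rv hl hrep hnd
    simp only [List.foldl_cons]
    have hw : w ∈ S := hl w (by simp)
    have hget := get?_aligned f1 f2 S hiff w hw rv hrep
    have hgd : (PySem.Dict.mk (rv.map (fun p => (f1 p.1, p.2)))).getD (f1 w) []
        = (PySem.Dict.mk (rv.map (fun p => (f2 p.1, p.2)))).getD (f2 w) [] := by
      unfold PySem.Dict.getD; rw [hget]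
    have hcont : (PySem.Dict.mk (rv.map (fun p => (f1 p.1, p.2)))).contains (f1 w)
        = (PySem.Dict.mk (rv.map (fun p => (f2 p.1, p.2)))).contains (f2 w) := by
      rw [PySem.Dict.contains_eq_isSome_get?, PySem.Dict.contains_eq_isSome_get?, hget]
    set V : List String := (PySem.Dict.mk (rv.map (fun p => (f1 p.1, p.2)))).getD (f1 w) [] ++ [w] with hV
    by_cases hc : (PySem.Dict.mk (rv.map (fun p => (f1 p.1, p.2)))).contains (f1 w) = true
    · -- key present: the entry is overwritten in place
      have hc2 : (PySem.Dict.mk (rv.map (fun p => (f2 p.1, p.2)))).contains (f2 w) = true := by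
        rw [← hcont]; exact hc
      have hd1 : ((PySem.Dict.mk (rv.map (fun p => (f1 p.1, p.2)))).insert (f1 w) V)
          = PySem.Dict.mk ((rv.map (fun p => if f1 p.1 == f1 w then (p.1, V) else p)).map (fun p => (f1 p.1, p.2))) := by
        apply PySem.Dict.ext
        rw [PySem.Dict.items_insert_of_contains _ _ hc]
        show List.map _ (List.map _ rv) = _
        rw [List.map_map, List.map_map]
        apply List.map_congr_left
        intro p _
        simp only [Function.comp]
        have hb1 : ((f1 p.1 == f1 w) = true) ↔ (f1 p.1 = f1 w) := beq_iff_eq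
        by_cases h : (f1 p.1 == f1 w) = true
        · rw [if_pos h, if_pos h]; simp [hb1.mp h]
        · rw [if_neg h, if_neg h]
      have hd2 : ((PySem.Dict.mk (rv.map (fun p => (f2 p.1, p.2)))).insert (f2 w) (((PySem.Dict.mk (rv.map (fun p => (f2 p.1, p.2)))).getD (f2 w) []) ++ [w]))
          = PySem.Dict.mk ((rv.map (fun p => if f1 p.1 == f1 w then (p.1, V) else p)).map (fun p => (f2 p.1, p.2))) := by
        apply PySem.Dict.ext
        rw [PySem.Dict.items_insert_of_contains _ _ hc2]
        show List.map _ (List.map _ rv) = _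
        rw [List.map_map, List.map_map]
        apply List.map_congr_left
        intro p hp
        have hiffp : (f1 p.1 = f1 w) ↔ (f2 p.1 = f2 w) := hiff p.1 (hrep p hp) w hw
        simp only [Function.comp]
        have hb1 : ((f1 p.1 == f1 w) = true) ↔ (f1 p.1 = f1 w) := beq_iff_eq
        have hb2 : ((f2 p.1 == f2 w) = true) ↔ (f2 p.1 = f2 w) := beq_iff_eq
        by_cases h : (f1 p.1 == f1 w) = true
        · rw [if_pos (hb2.mpr (hiffp.1 (hb1.mp h))), if_pos h]
          simp only [Prod.mk.injEq]
          exact ⟨(hiffp.1 (hb1.mp h)).symm, by rw [hV, hgd]⟩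
        · rw [if_neg (fun hc => h (hb1.mpr (hiffp.2 (hb2.mp hc)))), if_neg h]
      rw [hd1, hd2]
      apply ih
      · exact fun v hv => hl v (by simp [hv])
      · intro p hp
        rcases List.mem_map.1 hp with ⟨q, hq, rfl⟩
        by_cases h : (f1 q.1 == f1 w) = true
        · rw [if_pos h]; exact hrep q hq
        · rw [if_neg h]; exact hrep q hq
      · have hkeys : (rv.map (fun p => if f1 p.1 == f1 w then (p.1, V) else p)).map (fun p => f1 p.1)
            = rv.map (fun p => f1 p.1) := by
          rw [List.map_map]
          apply List.map_congr_left
          intro p _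
          simp only [Function.comp]
          have hb1 : ((f1 p.1 == f1 w) = true) ↔ (f1 p.1 = f1 w) := beq_iff_eq
          by_cases h : (f1 p.1 == f1 w) = true
          · rw [if_pos h, hb1.mp h]
          · rw [if_neg h]
        rw [hkeys]; exact hnd
    · -- key absent: a fresh entry is appended
      have hc' : (PySem.Dict.mk (rv.map (fun p => (f1 p.1, p.2)))).contains (f1 w) = false := by
        simpa using hc
      have hc2' : (PySem.Dict.mk (rv.map (fun p => (f2 p.1, p.2)))).contains (f2 w) = false := by
        rw [← hcont]; exact hc'
      have hd1 : ((PySem.Dict.mk (rv.map (fun p => (f1 p.1, p.2)))).insert (f1 w) V)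
          = PySem.Dict.mk ((rv ++ [(w, V)]).map (fun p => (f1 p.1, p.2))) := by
        apply PySem.Dict.ext
        rw [PySem.Dict.items_insert_of_not_contains _ _ hc']
        simp
      have hd2 : ((PySem.Dict.mk (rv.map (fun p => (f2 p.1, p.2)))).insert (f2 w) (((PySem.Dict.mk (rv.map (fun p => (f2 p.1, p.2)))).getD (f2 w) []) ++ [w]))
          = PySem.Dict.mk ((rv ++ [(w, V)]).map (fun p => (f2 p.1, p.2))) := by
        apply PySem.Dict.ext
        rw [PySem.Dict.items_insert_of_not_contains _ _ hc2']
        simp [hV, hgd]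
      rw [hd1, hd2]
      apply ih
      · exact fun v hv => hl v (by simp [hv])
      · intro p hp
        rcases List.mem_append.1 hp with h | h
        · exact hrep p h
        · simp only [List.mem_singleton] at h; rw [h]; exact hw
      · rw [List.map_append, List.nodup_append]
        refine ⟨hnd, by simp, ?_⟩
        intro x hx y hy
        have hy' : y = f1 w := by simpa using hy
        rcases List.mem_map.1 hx with ⟨q, hq, rfl⟩
        subst hy'
        intro hxw
        have hcq : (PySem.Dict.mk (rv.map (fun p => (f1 p.1, p.2)))).contains (f1 q.1) = true := by
          rw [PySem.Dict.contains_mk]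
          apply List.any_eq_true.2
          exact ⟨(f1 q.1, q.2), List.mem_map.2 ⟨q, hq, rfl⟩, by simp⟩
        rw [hxw] at hcq
        rw [hcq] at hc'
        exact absurd hc' (by simp)

-- A's option-threaded loop, on nonempty words, is the plain nkey loop
lemma foldA_eq (l : List String) : ∀ (d : PySem.Dict String (List String)),
    (∀ w ∈ l, w.toList ≠ []) →
    l.foldl (fun (acc : Option (PySem.Dict String (List String))) word =>
      match acc with
      | none => none
      | some out =>
        match pvNormalize word with
        | none => none
        | some normword => some (out.insert normword (out.getD normword [] ++ [word])))
      (some d)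
    = some (l.foldl (fun out w => out.insert (nkey w) (out.getD (nkey w) [] ++ [w])) d) := by
  induction l with
  | nil => intro d _; rfl
  | cons w l ih =>
    intro d h
    simp only [List.foldl_cons]
    rw [pvNormalize_eq_nkey w (h w (by simp))]
    exact ih _ (fun v hv => h v (by simp [hv]))

-- ---- staged-form characterisation of the grouping loop ----

-- first-appearance dedup as B computes it
def seenD (ks : List (List Int)) : List (List Int) :=
  ks.foldl (fun s k => if k ∈ s then s else s ++ [k]) []

lemma mem_seenD_aux (ks : List (List Int)) : ∀ (s : List (List Int)) (x : List Int),
    (x ∈ ks.foldl (fun s k => if k ∈ s then s else s ++ [k]) s) ↔ (x ∈ s ∨ x ∈ ks) := by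
  induction ks with
  | nil => intro s x; simp
  | cons k t ih =>
    intro s x
    simp only [List.foldl_cons]
    by_cases h : k ∈ s
    · rw [if_pos h, ih]
      constructor
      · rintro (hx | hx)
        · exact Or.inl hx
        · exact Or.inr (by simp [hx])
      · rintro (hx | hx)
        · exact Or.inl hx
        · rcases List.mem_cons.1 hx with rfl | hx
          · exact Or.inl h
          · exact Or.inr hx
    · rw [if_neg h, ih]
      simp only [List.mem_append, List.mem_cons]
      tauto

lemma mem_seenD (ks : List (List Int)) (x : List Int) : x ∈ seenD ks ↔ x ∈ ks := by
  unfold seenD; rw [mem_seenD_aux]; simp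

-- get? on a table built from a key list and a key-indexed value function
lemma get?_mk_tab (F : List Int → List String) (S : List (List Int)) (k : List Int) :
    (PySem.Dict.mk (S.map (fun x => (x, F x)))).get? k = if k ∈ S then some (F k) else none := by
  induction S with
  | nil => simp [PySem.Dict.get?]
  | cons a t ih =>
    simp only [List.map_cons, PySem.Dict.get?_mk_cons, ih]
    by_cases h : a = k
    · subst h; simp
    · rw [if_neg (by simpa using h)]
      by_cases hm : k ∈ t
      · rw [if_pos hm, if_pos (by simp [hm])]
      · rw [if_neg hm, if_neg (by simp [hm]; exact fun hc => absurd hc.symm h)]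

-- the dict-grouping loop, run over the whole list, is the staged dedup-and-filter form
lemma dictloop_items (g : String → List Int) (l : List String) :
    (l.foldl (fun out w => out.insert (g w) (out.getD (g w) [] ++ [w])) PySem.Dict.empty).items
      = (seenD (l.map g)).map (fun k => (k, l.filter (fun w => g w == k))) := by
  induction l using List.reverseRecOn with
  | nil => rfl
  | append_singleton l w ih =>
    rw [List.foldl_append, List.foldl_cons, List.foldl_nil]
    set d := l.foldl (fun out w => out.insert (g w) (out.getD (g w) [] ++ [w])) PySem.Dict.empty with hd
    have hdk : d = PySem.Dict.mk ((seenD (l.map g)).map (fun k => (k, l.filter (fun w => g w == k)))) := by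
      apply PySem.Dict.ext; exact ih
    have hget : d.get? (g w)
        = if g w ∈ seenD (l.map g) then some (l.filter (fun v => g v == g w)) else none := by
      rw [hdk]; exact get?_mk_tab _ _ _
    have hseen : seenD ((l ++ [w]).map g)
        = if g w ∈ seenD (l.map g) then seenD (l.map g) else seenD (l.map g) ++ [g w] := by
      unfold seenD
      rw [List.map_append, List.foldl_append]
      rfl
    have hfil : ∀ k, (l ++ [w]).filter (fun v => g v == k)
        = l.filter (fun v => g v == k) ++ (if g w == k then [w] else []) := by
      intro k
      rw [List.filter_append]
      congr 1
      by_cases h : (g w == k) = true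
      · simp [List.filter, h]
      · simp [List.filter, h]
    by_cases hmem : g w ∈ seenD (l.map g)
    · have hc : d.contains (g w) = true := by
        rw [PySem.Dict.contains_eq_isSome_get?, hget, if_pos hmem]; rfl
      have hgd : d.getD (g w) [] = l.filter (fun v => g v == g w) := by
        unfold PySem.Dict.getD; rw [hget, if_pos hmem]; rfl
      rw [PySem.Dict.items_insert_of_contains _ _ hc, hseen, if_pos hmem, ih, hgd,
        List.map_map]
      apply List.map_congr_left
      intro k hk
      simp only [Function.comp]
      rw [hfil k]
      by_cases h : (k == g w) = true
      · have hkw : k = g w := by simpa using h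
        rw [if_pos h]
        subst hkw
        simp
      · have hkw : ¬ (g w == k) = true := by
          simp only [beq_iff_eq] at h ⊢; exact fun hc => h hc.symm
        rw [if_neg h, if_neg hkw]
        simp
    · have hc : d.contains (g w) = false := by
        rw [PySem.Dict.contains_eq_isSome_get?, hget, if_neg hmem]; rfl
      have hgd : d.getD (g w) [] = [] := by
        unfold PySem.Dict.getD; rw [hget, if_neg hmem]; rfl
      have hnew : l.filter (fun v => g v == g w) = [] := by
        rw [List.filter_eq_nil_iff]
        intro v hv hbe
        have : g v = g w := by simpa using hbe
        exact hmem ((mem_seenD _ _).2 (this ▸ List.mem_map_of_mem hv))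
      rw [PySem.Dict.items_insert_of_not_contains _ _ hc, hseen, if_neg hmem, ih, hgd,
        List.map_append]
      congr 1
      · apply List.map_congr_left
        intro k hk
        rw [hfil k]
        have hkw : ¬ (g w == k) = true := by
          simp only [beq_iff_eq]
          intro hc2
          exact hmem (hc2 ▸ hk)
        rw [if_neg hkw]
        simp
      · simp [hfil, hnew]

-- B's zipped filter is a plain filter by the key function
lemma zipfilter (g : String → List Int) (l : List String) (k : List Int) :
    ((l.zip (l.map g)).filter (fun p => p.2 == k)).map Prod.fst = l.filter (fun w => g w == k) := by
  induction l with
  | nil => rfl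
  | cons w t ih =>
    simp only [List.map_cons, List.zip_cons_cons, List.filter_cons]
    by_cases h : (g w == k) = true
    · rw [if_pos h, if_pos h, List.map_cons, ih]
    · rw [if_neg h, if_neg h]
      exact ih

lemma toList_ne_nil_of_ne_empty (w : String) (h : w ≠ "") : w.toList ≠ [] := by
  intro hc
  apply h
  have := congrArg String.ofList hc
  simpa using this

-- ===== VERDICT (by name: the statement is the Claim_ definition above) =====
theorem groupings_spec : Claim_equal_groupings := by
  intro words _ hpre
  unfold Spec_groupings groupings groupings_alt
  have hne : ∀ w ∈ words, w.toList ≠ [] :=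
    fun w hw => toList_ne_nil_of_ne_empty w (hpre w hw)
  rw [foldA_eq words PySem.Dict.empty hne]
  have hiff : ∀ a ∈ words, ∀ b ∈ words, (nkey a = nkey b ↔ dlist a.toList = dlist b.toList) :=
    fun a ha b hb => nkey_iff_diff a b (hne a ha) (hne b hb)
  have hloop := loop_values nkey (fun w => dlist w.toList) words hiff words [] (fun _ h => h) (by simp) (by simp)
  simp only [List.map_nil] at hloop
  have hloop' : (words.foldl (fun out w => out.insert (nkey w) (out.getD (nkey w) [] ++ [w])) PySem.Dict.empty).values
      = (words.foldl (fun out w => out.insert (dlist w.toList) (out.getD (dlist w.toList) [] ++ [w])) PySem.Dict.empty).values := hloop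
  have hkeyf : words.map pvDiffKey = words.map (fun w => dlist w.toList) :=
    List.map_congr_left (fun w _ => pvDiffKey_eq_dlist w)
  show (words.foldl (fun out w => out.insert (nkey w) (out.getD (nkey w) [] ++ [w])) PySem.Dict.empty).values
      = ((words.map pvDiffKey).foldl (fun s k => if k ∈ s then s else s ++ [k]) []).map
          (fun k => ((words.zip (words.map pvDiffKey)).filter (fun p => p.2 == k)).map Prod.fst)
  rw [hloop', hkeyf]
  have hvals : (words.foldl (fun out w => out.insert (dlist w.toList) (out.getD (dlist w.toList) [] ++ [w])) PySem.Dict.empty).values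
      = (seenD (words.map (fun w => dlist w.toList))).map (fun k => words.filter (fun w => dlist w.toList == k)) := by
    show ((words.foldl (fun out w => out.insert (dlist w.toList) (out.getD (dlist w.toList) [] ++ [w])) PySem.Dict.empty).items).map Prod.snd = _
    rw [dictloop_items (fun w => dlist w.toList) words, List.map_map]
    rfl
  rw [hvals]
  unfold seenD
  apply List.map_congr_left
  intro k _
  exact (zipfilter (fun w => dlist w.toList) words k).symm
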